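-- pv_equiv track=rewrite | github.com/green-blotch/ledthemfight | effect_library/FastLED_BlurDemo.py | blur1d
-- ===== SOURCE A (Python) =====
-- def blur1d(pixels, num_leds, blur_amount):
--     """Blur the strip by blending neighboring pixels"""
--     if blur_amount == 0:
--         return pixels
--
--     # Keep = (255 - blur_amount) / 2
--     # Share = blur_amount / 2
--     keep = ((255 - blur_amount) * 256) >> 9  # Fixed point math
--     share = (blur_amount * 256) >> 9
--
--     new_pixels = {}
--
--     for i in range(num_leds):
--         # Get current pixel and neighbors
--         current = pixels.get(i, (0, 0, 0))
--         left = pixels.get((i - 1) % num_leds, (0, 0, 0))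
--         right = pixels.get((i + 1) % num_leds, (0, 0, 0))
--
--         # Blend with neighbors
--         r = ((current[0] * keep) + (left[0] * share) + (right[0] * share)) >> 8
--         g = ((current[1] * keep) + (left[1] * share) + (right[1] * share)) >> 8
--         b = ((current[2] * keep) + (left[2] * share) + (right[2] * share)) >> 8
--
--         new_color = (min(255, r), min(255, g), min(255, b))
--
--         # Only store if not black (sparse storage)
--         if new_color != (0, 0, 0):
--             new_pixels[i] = new_color
--
--     return new_pixels
-- ===== SOURCE B (Python) =====
-- def blur1d(pixels, num_leds, blur_amount):
--     """Blur the strip by scattering each pixel's weighted color to itself and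
--     its two ring neighbors, instead of gathering three neighbors per LED."""
--     if blur_amount == 0:
--         return pixels
--
--     keep = ((255 - blur_amount) * 256) >> 9  # Fixed point math
--     share = (blur_amount * 256) >> 9
--
--     sums = {}
--     for p, c in pixels.items():
--         if 0 <= p < num_leds:
--             for pos, w in ((p, keep), ((p + 1) % num_leds, share), ((p - 1) % num_leds, share)):
--                 r, g, b = sums.get(pos, (0, 0, 0))
--                 sums[pos] = (r + c[0] * w, g + c[1] * w, b + c[2] * w)
--
--     new_pixels = {}
--     for i in range(num_leds):
--         r, g, b = sums.get(i, (0, 0, 0))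
--         color = (min(255, r >> 8), min(255, g >> 8), min(255, b >> 8))
--         if color != (0, 0, 0):
--             new_pixels[i] = color
--     return new_pixels
-- ===== Notes on version B (the rewrite author's own statement) =====
-- stated objective: alternative
-- what changed: Replaces the per-LED gather of three modular-neighbor dict lookups by a scatter pass that adds each pixel's keep/share-weighted color into an accumulator dict at itself and its two ring neighbors, followed by a single accumulator lookup per LED when emitting.
import Mathlib
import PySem

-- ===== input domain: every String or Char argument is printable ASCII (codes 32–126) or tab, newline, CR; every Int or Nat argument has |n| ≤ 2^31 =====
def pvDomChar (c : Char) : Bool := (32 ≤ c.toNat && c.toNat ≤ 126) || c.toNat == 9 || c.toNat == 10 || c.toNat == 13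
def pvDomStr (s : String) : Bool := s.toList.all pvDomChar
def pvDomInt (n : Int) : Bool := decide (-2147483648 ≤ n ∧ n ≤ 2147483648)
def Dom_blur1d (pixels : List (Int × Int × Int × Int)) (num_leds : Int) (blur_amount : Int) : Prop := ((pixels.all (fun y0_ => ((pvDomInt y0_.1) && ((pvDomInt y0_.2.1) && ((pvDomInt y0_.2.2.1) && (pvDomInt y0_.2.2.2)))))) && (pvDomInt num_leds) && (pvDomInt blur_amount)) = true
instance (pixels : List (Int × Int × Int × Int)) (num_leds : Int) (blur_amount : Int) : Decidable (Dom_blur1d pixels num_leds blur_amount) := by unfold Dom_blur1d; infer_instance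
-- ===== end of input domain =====

-- B replaces the per-LED gather of three dict lookups by one scatter pass over the
-- pixel entries followed by a single lookup per LED (objective: alternative).

-- ===== PORT A =====
def blur1d (pixels : List (Int × Int × Int × Int)) (num_leds : Int) (blur_amount : Int) : List (Int × Int × Int × Int) :=
  if blur_amount == 0 then pixels else
  let keep := PySem.Int.floordiv ((255 - blur_amount) * 256) 512
  let share := PySem.Int.floordiv (blur_amount * 256) 512
  let d : PySem.Dict Int (Int × Int × Int) := PySem.Dict.mk pixels
  let out := (PySem.List.pyRange 0 num_leds 1).foldl
    (fun (np : PySem.Dict Int (Int × Int × Int)) i =>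
      let current := d.getD i (0, 0, 0)
      let left := d.getD (PySem.Int.mod (i - 1) num_leds) (0, 0, 0)
      let right := d.getD (PySem.Int.mod (i + 1) num_leds) (0, 0, 0)
      let r := PySem.Int.floordiv (current.1 * keep + left.1 * share + right.1 * share) 256
      let g := PySem.Int.floordiv (current.2.1 * keep + left.2.1 * share + right.2.1 * share) 256
      let b := PySem.Int.floordiv (current.2.2 * keep + left.2.2 * share + right.2.2 * share) 256
      let nc : Int × Int × Int := (min 255 r, min 255 g, min 255 b)
      if nc ≠ (0, 0, 0) then np.insert i nc else np)
    PySem.Dict.empty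
  out.items

-- ===== PORT B =====
-- pixels.items(): under the assoc-list convention (lookup = first match) the dict's
-- items are the first-occurrence-per-key entries of the list.
def pvItems : List Int → List (Int × Int × Int × Int) → List (Int × Int × Int × Int)
  | _, [] => []
  | seen, x :: xs => if x.1 ∈ seen then pvItems seen xs else x :: pvItems (x.1 :: seen) xs

-- one scatter step: add the weighted color of pixel p to p, (p+1)%n, (p-1)%n
def pvScatter (n keep share : Int) (d : PySem.Dict Int (Int × Int × Int))
    (p : Int) (c : Int × Int × Int) : PySem.Dict Int (Int × Int × Int) :=
  if 0 ≤ p ∧ p < n then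
    [(p, keep), (PySem.Int.mod (p + 1) n, share), (PySem.Int.mod (p - 1) n, share)].foldl
      (fun d pw =>
        d.modify pw.1 (0, 0, 0)
          (fun s => (s.1 + c.1 * pw.2, s.2.1 + c.2.1 * pw.2, s.2.2 + c.2.2 * pw.2)))
      d
  else d

def blur1d_alt (pixels : List (Int × Int × Int × Int)) (num_leds : Int) (blur_amount : Int) : List (Int × Int × Int × Int) :=
  if blur_amount == 0 then pixels else
  let keep := PySem.Int.floordiv ((255 - blur_amount) * 256) 512
  let share := PySem.Int.floordiv (blur_amount * 256) 512
  let sums := (pvItems [] pixels).foldl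
    (fun d x => pvScatter num_leds keep share d x.1 x.2) PySem.Dict.empty
  let out := (PySem.List.pyRange 0 num_leds 1).foldl
    (fun (np : PySem.Dict Int (Int × Int × Int)) i =>
      let s := sums.getD i (0, 0, 0)
      let nc : Int × Int × Int :=
        (min 255 (PySem.Int.floordiv s.1 256), min 255 (PySem.Int.floordiv s.2.1 256),
         min 255 (PySem.Int.floordiv s.2.2 256))
      if nc ≠ (0, 0, 0) then np.insert i nc else np)
    PySem.Dict.empty
  out.items

-- ===== PRECONDITION & SPEC =====
def Spec_blur1d (pixels : List (Int × Int × Int × Int)) (num_leds : Int) (blur_amount : Int) (out : List (Int × Int × Int × Int)) : Prop := out = blur1d_alt pixels num_leds blur_amount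
instance (pixels : List (Int × Int × Int × Int)) (num_leds : Int) (blur_amount : Int) (out : List (Int × Int × Int × Int)) : Decidable (Spec_blur1d pixels num_leds blur_amount out) := by unfold Spec_blur1d; infer_instance

-- ===== CLAIM (what is proved, stated in full; the proofs are below) =====
def Claim_equal_blur1d : Prop := ∀ (pixels : List (Int × Int × Int × Int)) (num_leds : Int) (blur_amount : Int), Dom_blur1d pixels num_leds blur_amount → Spec_blur1d pixels num_leds blur_amount (blur1d pixels num_leds blur_amount)

-- ===== LEMMAS AND PROOFS =====

-- componentwise arithmetic on color triples
def pvAdd (a b : Int × Int × Int) : Int × Int × Int := (a.1 + b.1, a.2.1 + b.2.1, a.2.2 + b.2.2)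
def pvMul (a : Int × Int × Int) (w : Int) : Int × Int × Int := (a.1 * w, a.2.1 * w, a.2.2 * w)

-- first-match lookup with default (0,0,0)
def pvLk : List (Int × Int × Int × Int) → Int → Int × Int × Int
  | [], _ => (0, 0, 0)
  | x :: xs, k => if x.1 = k then x.2 else pvLk xs k

-- contribution of one entry to position k
def pvContrib (n keep share : Int) (x : Int × Int × Int × Int) (k : Int) : Int × Int × Int :=
  if 0 ≤ x.1 ∧ x.1 < n then
    pvAdd (pvAdd (if x.1 = k then pvMul x.2 keep else (0, 0, 0))
                 (if PySem.Int.mod (x.1 + 1) n = k then pvMul x.2 share else (0, 0, 0)))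
          (if PySem.Int.mod (x.1 - 1) n = k then pvMul x.2 share else (0, 0, 0))
  else (0, 0, 0)

def pvCsum (n keep share : Int) : List (Int × Int × Int × Int) → Int → Int × Int × Int
  | [], _ => (0, 0, 0)
  | x :: xs, k => pvAdd (pvContrib n keep share x k) (pvCsum n keep share xs k)

-- additive select sum at key k
def pvSel : List (Int × Int × Int × Int) → Int → Int × Int × Int
  | [], _ => (0, 0, 0)
  | x :: xs, k => pvAdd (if x.1 = k then x.2 else (0, 0, 0)) (pvSel xs k)

theorem pvAdd_zero (a : Int × Int × Int) : pvAdd a (0, 0, 0) = a := by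
  simp [pvAdd, Prod.ext_iff]

theorem pvZero_add (a : Int × Int × Int) : pvAdd (0, 0, 0) a = a := by
  simp [pvAdd, Prod.ext_iff]

theorem pvMk_getD (xs : List (Int × Int × Int × Int)) (k : Int) :
    (PySem.Dict.mk xs).getD k (0, 0, 0) = pvLk xs k := by
  induction xs with
  | nil => rfl
  | cons x xs ih =>
    rw [PySem.Dict.getD_eq_get?_getD, PySem.Dict.get?_mk_cons]
    rw [PySem.Dict.getD_eq_get?_getD] at ih
    by_cases h : x.1 = k
    · simp [pvLk, h]
    · simp [pvLk, h, ih, (beq_iff_eq (a := x.1) (b := k))]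

theorem pvSel_of_not_mem (xs : List (Int × Int × Int × Int)) (k : Int)
    (h : k ∉ xs.map (·.1)) : pvSel xs k = (0, 0, 0) := by
  induction xs with
  | nil => rfl
  | cons x xs ih =>
    simp only [List.map_cons, List.mem_cons] at h
    push_neg at h
    have hne : x.1 ≠ k := fun hx => h.1 hx.symm
    simp [pvSel, hne, ih h.2, pvZero_add]

theorem pvSel_eq_lk (xs : List (Int × Int × Int × Int)) (k : Int)
    (h : (xs.map (·.1)).Nodup) : pvSel xs k = pvLk xs k := by
  induction xs with
  | nil => rfl
  | cons x xs ih =>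
    simp only [List.map_cons, List.nodup_cons] at h
    by_cases hx : x.1 = k
    · subst hx
      simp [pvSel, pvLk, pvSel_of_not_mem xs x.1 h.1, pvAdd_zero]
    · simp [pvSel, pvLk, hx, pvZero_add, ih h.2]

-- pvItems: keys are disjoint from seen, keys nodup, first-match lookup preserved
theorem pvItems_keys (seen : List Int) (xs : List (Int × Int × Int × Int)) :
    ((pvItems seen xs).map (·.1)).Nodup ∧ ∀ k ∈ (pvItems seen xs).map (·.1), k ∉ seen := by
  induction xs generalizing seen with
  | nil => simp [pvItems]
  | cons x xs ih =>
    by_cases h : x.1 ∈ seen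
    · simpa [pvItems, h] using ih seen
    · have ih' := ih (x.1 :: seen)
      refine ⟨?_, ?_⟩
      · simp only [pvItems, h, if_false, List.map_cons, List.nodup_cons]
        exact ⟨fun hmem => (ih'.2 _ hmem) (List.mem_cons_self), ih'.1⟩
      · intro k hk
        simp only [pvItems, h, if_false, List.map_cons, List.mem_cons] at hk
        rcases hk with rfl | hk
        · exact h
        · exact fun hs => (ih'.2 _ hk) (List.mem_cons_of_mem _ hs)

theorem pvLk_items (seen : List Int) (xs : List (Int × Int × Int × Int)) (k : Int)
    (h : k ∉ seen) : pvLk (pvItems seen xs) k = pvLk xs k := by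
  induction xs generalizing seen with
  | nil => rfl
  | cons x xs ih =>
    by_cases hs : x.1 ∈ seen
    · have hne : x.1 ≠ k := fun he => h (he ▸ hs)
      simp [pvItems, hs, pvLk, hne, ih seen h]
    · by_cases hx : x.1 = k
      · simp [pvItems, pvLk, hx, h]
      · have h' : k ∉ x.1 :: seen := by
          simp only [List.mem_cons]
          push_neg
          exact ⟨fun he => hx he.symm, h⟩
        simp [pvItems, hs, pvLk, hx, ih (x.1 :: seen) h']

-- getD after one modify adds one (possibly zero) weighted contribution
theorem pvModify_getD (d : PySem.Dict Int (Int × Int × Int)) (pos w k : Int) (c : Int × Int × Int) :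
    ((d.modify pos (0, 0, 0)
        (fun s => (s.1 + c.1 * w, s.2.1 + c.2.1 * w, s.2.2 + c.2.2 * w))).getD k (0, 0, 0))
      = pvAdd (d.getD k (0, 0, 0)) (if pos = k then pvMul c w else (0, 0, 0)) := by
  rw [PySem.Dict.getD_modify]
  by_cases h : k = pos
  · subst h
    simp [pvAdd, pvMul]
  · rw [if_neg h, if_neg (fun hh => h (Eq.symm hh)), pvAdd_zero]

-- one scatter step adds exactly the contribution
theorem pvScatter_getD (n keep share : Int) (d : PySem.Dict Int (Int × Int × Int))
    (x : Int × Int × Int × Int) (k : Int) :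
    (pvScatter n keep share d x.1 x.2).getD k (0, 0, 0)
      = pvAdd (d.getD k (0, 0, 0)) (pvContrib n keep share x k) := by
  unfold pvScatter pvContrib
  by_cases hr : 0 ≤ x.1 ∧ x.1 < n
  · rw [if_pos hr, if_pos hr]
    simp only [List.foldl_cons, List.foldl_nil]
    rw [pvModify_getD, pvModify_getD, pvModify_getD]
    simp only [pvAdd, Prod.ext_iff]
    refine ⟨by ring, by ring, by ring⟩
  · rw [if_neg hr, if_neg hr, pvAdd_zero]

theorem pvFold_getD (n keep share : Int) (l : List (Int × Int × Int × Int))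
    (d : PySem.Dict Int (Int × Int × Int)) (k : Int) :
    ((l.foldl (fun d x => pvScatter n keep share d x.1 x.2) d).getD k (0, 0, 0))
      = pvAdd (d.getD k (0, 0, 0)) (pvCsum n keep share l k) := by
  induction l generalizing d with
  | nil => simp [pvCsum, pvAdd_zero]
  | cons x xs ih =>
    simp only [List.foldl_cons, pvCsum]
    rw [ih, pvScatter_getD]
    simp [pvAdd, Prod.ext_iff]
    refine ⟨by ring, by ring, by ring⟩

-- pointwise: contribution of one entry, for a target position k in range
theorem pvModIff (n a b d : Int) (hn : 0 < n) (ha0 : 0 ≤ a) (han : a < n)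
    (hb0 : 0 ≤ b) (hbn : b < n) : ((a + d) % n = b) ↔ (a = (b - d) % n) := by
  constructor
  · intro h
    have ha : a % n = a := Int.emod_eq_of_lt ha0 han
    calc a = (a + d + -d) % n := by rw [add_neg_cancel_right, ha]
    _ = ((a + d) % n + -d) % n := (Int.emod_add_emod (a + d) n (-d)).symm
    _ = (b - d) % n := by rw [h, sub_eq_add_neg]
  · intro h
    have hb : b % n = b := Int.emod_eq_of_lt hb0 hbn
    calc (a + d) % n = ((b - d) % n + d) % n := by rw [h]
    _ = (b - d + d) % n := Int.emod_add_emod (b - d) n d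
    _ = b := by rw [sub_add_cancel, hb]

theorem pvContrib_eq (n keep share : Int) (x : Int × Int × Int × Int) (k : Int)
    (hk0 : 0 ≤ k) (hkn : k < n) :
    pvContrib n keep share x k
      = pvAdd (pvAdd (if x.1 = k then pvMul x.2 keep else (0, 0, 0))
                     (if x.1 = PySem.Int.mod (k - 1) n then pvMul x.2 share else (0, 0, 0)))
              (if x.1 = PySem.Int.mod (k + 1) n then pvMul x.2 share else (0, 0, 0)) := by
  have hn : 0 < n := lt_of_le_of_lt hk0 hkn
  unfold pvContrib
  rw [PySem.Int.mod_eq_emod_of_pos hn, PySem.Int.mod_eq_emod_of_pos hn,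
      PySem.Int.mod_eq_emod_of_pos hn, PySem.Int.mod_eq_emod_of_pos hn]
  by_cases hr : 0 ≤ x.1 ∧ x.1 < n
  · rw [if_pos hr]
    have h1 : ((x.1 + 1) % n = k) ↔ (x.1 = (k - 1) % n) := by
      have := pvModIff n x.1 k 1 hn hr.1 hr.2 hk0 hkn
      simpa using this
    have h2 : ((x.1 - 1) % n = k) ↔ (x.1 = (k + 1) % n) := by
      have := pvModIff n x.1 k (-1) hn hr.1 hr.2 hk0 hkn
      simpa [sub_eq_add_neg] using this
    simp only [h1, h2]
  · rw [if_neg hr]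
    have hb1 := Int.emod_nonneg (k - 1) (by omega : n ≠ 0)
    have hb2 := Int.emod_lt_of_pos (k - 1) hn
    have hb3 := Int.emod_nonneg (k + 1) (by omega : n ≠ 0)
    have hb4 := Int.emod_lt_of_pos (k + 1) hn
    have h0 : ¬ (x.1 = k) := by omega
    have h1 : ¬ (x.1 = (k - 1) % n) := by omega
    have h2 : ¬ (x.1 = (k + 1) % n) := by omega
    simp [h0, h1, h2, pvAdd_zero]

-- the scatter sum splits into three select sums
theorem pvCsum_eq_sel (n keep share : Int) (l : List (Int × Int × Int × Int)) (k : Int)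
    (hk0 : 0 ≤ k) (hkn : k < n) :
    pvCsum n keep share l k
      = pvAdd (pvAdd (pvMul (pvSel l k) keep)
                     (pvMul (pvSel l (PySem.Int.mod (k - 1) n)) share))
              (pvMul (pvSel l (PySem.Int.mod (k + 1) n)) share) := by
  induction l with
  | nil => simp [pvCsum, pvSel, pvMul, pvAdd]
  | cons x xs ih =>
    simp only [pvCsum, pvSel]
    rw [ih, pvContrib_eq n keep share x k hk0 hkn]
    split_ifs <;> refine Prod.ext ?_ (Prod.ext ?_ ?_) <;>
      simp [pvAdd, pvMul] <;> ring

-- final form of the accumulated sum at an in-range position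
theorem pvSums_getD (pixels : List (Int × Int × Int × Int)) (n keep share : Int) (k : Int)
    (hk0 : 0 ≤ k) (hkn : k < n) :
    (((pvItems [] pixels).foldl (fun d x => pvScatter n keep share d x.1 x.2)
        PySem.Dict.empty).getD k (0, 0, 0))
      = pvAdd (pvAdd (pvMul (pvLk pixels k) keep)
                     (pvMul (pvLk pixels (PySem.Int.mod (k - 1) n)) share))
              (pvMul (pvLk pixels (PySem.Int.mod (k + 1) n)) share) := by
  rw [pvFold_getD]
  have hnodup := (pvItems_keys [] pixels).1
  rw [pvCsum_eq_sel n keep share _ k hk0 hkn,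
      pvSel_eq_lk _ _ hnodup, pvSel_eq_lk _ _ hnodup, pvSel_eq_lk _ _ hnodup,
      pvLk_items [] pixels _ (List.not_mem_nil),
      pvLk_items [] pixels _ (List.not_mem_nil),
      pvLk_items [] pixels _ (List.not_mem_nil)]
  simp [PySem.Dict.getD_empty, pvZero_add]

-- ===== VERDICT (by name: the statement is the Claim_ definition above) =====
theorem blur1d_spec : Claim_equal_blur1d := by
  intro pixels num_leds blur_amount _
  unfold Spec_blur1d blur1d blur1d_alt
  by_cases hba : blur_amount == 0
  · simp [hba]
  · simp only [hba, Bool.false_eq_true, if_false]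
    apply congrArg PySem.Dict.items
    apply PySem.List.foldl_congr_mem
    intro acc i hi
    rw [PySem.List.mem_pyRange_one] at hi
    rw [pvSums_getD pixels num_leds _ _ i hi.1 hi.2]
    rw [pvMk_getD, pvMk_getD, pvMk_getD]
    simp only [pvAdd, pvMul]
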